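-- pv_equiv track=rewrite | github.com/yamachar106/inv_sentinel | screener/signal_store.py | diff_signals
-- ===== SOURCE A (Python) =====
-- def diff_signals(
--     current: dict[str, list[str]],
--     previous: dict[str, list[str]],
-- ) -> dict[str, dict[str, list[str]]]:
--     """
--     前回との差分を計算する。
--
--     Returns:
--         {
--             "breakout:US": {
--                 "new": ["NVDA"],         # 今日初出
--                 "continuing": ["AAPL"],  # 昨日もあった
--                 "disappeared": ["TSLA"], # 昨日あったが今日なし
--             },
--             ...
--         }
--     """
--     all_keys = set(list(current.keys()) + list(previous.keys()))
--     result = {}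
--
--     for key in all_keys:
--         curr_set = set(current.get(key, []))
--         prev_set = set(previous.get(key, []))
--
--         new = sorted(curr_set - prev_set)
--         continuing = sorted(curr_set & prev_set)
--         disappeared = sorted(prev_set - curr_set)
--
--         if new or continuing or disappeared:
--             result[key] = {
--                 "new": new,
--                 "continuing": continuing,
--                 "disappeared": disappeared,
--             }
--
--     return result
-- ===== SOURCE B (Python) =====
-- def _classify(cs, ps):
--     # Two-pointer merge of two strictly increasing lists into
--     # (only in cs, in both, only in ps), each already sorted.
--     new, cont, dis = [], [], []
--     i = j = 0
--     while i < len(cs) and j < len(ps):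
--         if cs[i] == ps[j]:
--             cont.append(cs[i])
--             i += 1
--             j += 1
--         elif cs[i] < ps[j]:
--             new.append(cs[i])
--             i += 1
--         else:
--             dis.append(ps[j])
--             j += 1
--     new.extend(cs[i:])
--     dis.extend(ps[j:])
--     return new, cont, dis
--
--
-- def diff_signals(
--     current: dict[str, list[str]],
--     previous: dict[str, list[str]],
-- ) -> dict[str, dict[str, list[str]]]:
--     # Sort each side once, classify with a single sorted merge, and build the
--     # result dict as a comprehension over the deduplicated keys.
--     triples = (
--         (key, _classify(sorted(set(current.get(key, []))),
--                         sorted(set(previous.get(key, [])))))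
--         for key in dict.fromkeys([*current, *previous])
--     )
--     return {
--         key: {"new": n, "continuing": c, "disappeared": d}
--         for key, (n, c, d) in triples
--         if n or c or d
--     }
-- ===== Notes on version B (the rewrite author's own statement) =====
-- stated objective: alternative
-- what changed: Per key, the three set difference/intersection operations followed by three sorts are replaced by sorting each side once and classifying with a single two-pointer merge over the two sorted lists; the result dict is built as a comprehension over the deduplicated keys instead of conditional inserts in a loop.
import Mathlib
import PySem

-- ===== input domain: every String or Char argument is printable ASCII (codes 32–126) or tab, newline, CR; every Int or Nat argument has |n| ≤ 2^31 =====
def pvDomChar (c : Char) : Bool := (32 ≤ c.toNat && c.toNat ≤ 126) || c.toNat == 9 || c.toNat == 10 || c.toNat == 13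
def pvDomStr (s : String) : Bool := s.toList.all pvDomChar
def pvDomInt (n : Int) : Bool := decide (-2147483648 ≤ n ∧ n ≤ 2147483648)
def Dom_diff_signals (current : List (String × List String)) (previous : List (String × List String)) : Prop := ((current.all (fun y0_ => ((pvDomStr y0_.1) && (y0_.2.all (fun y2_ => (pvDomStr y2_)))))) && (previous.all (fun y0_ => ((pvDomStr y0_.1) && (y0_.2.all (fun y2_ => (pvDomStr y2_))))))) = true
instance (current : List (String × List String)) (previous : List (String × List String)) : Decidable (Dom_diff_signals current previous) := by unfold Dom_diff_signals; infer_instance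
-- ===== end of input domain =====

-- B replaces the per-key set difference/intersection operations plus three sorts by sorting
-- each side once and classifying with a single two-pointer merge, and builds the result as a
-- filterMap comprehension over the deduplicated keys; alternative decomposition, same cost.


-- ===== PORT A =====
-- Python A iterates over set(...keys...) in hash order; the resulting dict is compared
-- ignoring order, so the port iterates the keys in first-occurrence order (PySem.Set.ofList).
def diff_signals (current : List (String × List String)) (previous : List (String × List String)) : List (String × List (String × List String)) :=
  let curD := PySem.Dict.mk current
  let prevD := PySem.Dict.mk previous
  let allKeys := PySem.Set.ofList (curD.keys ++ prevD.keys)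
  (allKeys.foldl (fun result key =>
      let currSet := PySem.Set.ofList (curD.getD key [])
      let prevSet := PySem.Set.ofList (prevD.getD key [])
      let new := PySem.List.sorted (PySem.Set.diff currSet prevSet) (fun x => x) false
      let continuing := PySem.List.sorted (PySem.Set.inter currSet prevSet) (fun x => x) false
      let disappeared := PySem.List.sorted (PySem.Set.diff prevSet currSet) (fun x => x) false
      if !new.isEmpty || !continuing.isEmpty || !disappeared.isEmpty then
        result.insert key [("new", new), ("continuing", continuing), ("disappeared", disappeared)]
      else result)
    PySem.Dict.empty).items

-- ===== PORT B =====
-- _classify: the while loop over indices i, j becomes structural recursion on the two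
-- remaining suffixes, with the three output lists as accumulators (appends at the end,
-- exactly as list.append/extend do).
def pvClassify : List String → List String → List String → List String → List String →
    List String × List String × List String
  | c :: cs, p :: ps, n, k, d =>
    if c == p then pvClassify cs ps n (k ++ [c]) d
    else if c < p then pvClassify cs (p :: ps) (n ++ [c]) k d
    else pvClassify (c :: cs) ps n k (d ++ [p])
  | cs, ps, n, k, d => (n ++ cs, k, d ++ ps)
termination_by cs ps _ _ _ => cs.length + ps.length

def diff_signals_alt (current : List (String × List String)) (previous : List (String × List String)) : List (String × List (String × List String)) :=
  let curD := PySem.Dict.mk current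
  let prevD := PySem.Dict.mk previous
  (PySem.List.dedup (curD.keys ++ prevD.keys)).filterMap (fun key =>
    let r := pvClassify
        (PySem.List.sorted (PySem.Set.ofList (curD.getD key [])) (fun x => x) false)
        (PySem.List.sorted (PySem.Set.ofList (prevD.getD key [])) (fun x => x) false)
        [] [] []
    if !r.1.isEmpty || !r.2.1.isEmpty || !r.2.2.isEmpty then
      some (key, [("new", r.1), ("continuing", r.2.1), ("disappeared", r.2.2)])
    else none)

-- ===== PRECONDITION & SPEC =====
def Spec_diff_signals (current : List (String × List String)) (previous : List (String × List String)) (out : List (String × List (String × List String))) : Prop := out = diff_signals_alt current previous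
instance (current : List (String × List String)) (previous : List (String × List String)) (out : List (String × List (String × List String))) : Decidable (Spec_diff_signals current previous out) := by unfold Spec_diff_signals; infer_instance

-- ===== CLAIM (what is proved, stated in full; the proofs are below) =====
def Claim_equal_diff_signals : Prop := ∀ (current : List (String × List String)) (previous : List (String × List String)), Dom_diff_signals current previous → Spec_diff_signals current previous (diff_signals current previous)

-- ===== LEMMAS AND PROOFS =====

-- the merge classifies by membership: on strictly increasing inputs it yields the
-- filter-partition (only-in-cs, in-both, only-in-ps), each appended to its accumulator
theorem pvClassify_spec (cs ps : List String) (n k d : List String) :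
    cs.Pairwise (· < ·) → ps.Pairwise (· < ·) →
    pvClassify cs ps n k d
      = (n ++ cs.filter (fun x => !ps.contains x),
         k ++ cs.filter (fun x => ps.contains x),
         d ++ ps.filter (fun x => !cs.contains x)) := by
  fun_induction pvClassify cs ps n k d with
  | case1 c cs p ps n k d heq ih =>
    intro hc hp
    obtain ⟨hcall, hc'⟩ := List.pairwise_cons.mp hc
    obtain ⟨hpall, hp'⟩ := List.pairwise_cons.mp hp
    have hcp : c = p := by simpa using heq
    subst hcp
    rw [ih hc' hp']
    have hmem : (c :: ps).contains c = true := by simp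
    have hmem' : (c :: cs).contains c = true := by simp
    have e1 : (c :: cs).filter (fun x => !(c :: ps).contains x)
        = cs.filter (fun x => !ps.contains x) := by
      rw [List.filter_cons]
      simp only [hmem, Bool.not_true, Bool.false_eq_true, if_false]
      exact List.filter_congr (fun x hx => by
        simp [(hcall x hx).ne'])
    have e2 : (c :: cs).filter (fun x => (c :: ps).contains x)
        = c :: cs.filter (fun x => ps.contains x) := by
      rw [List.filter_cons]
      simp only [hmem, if_true]
      congr 1
      exact List.filter_congr (fun x hx => by
        simp [(hcall x hx).ne'])
    have e3 : (c :: ps).filter (fun x => !(c :: cs).contains x)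
        = ps.filter (fun x => !cs.contains x) := by
      rw [List.filter_cons]
      simp only [hmem', Bool.not_true, Bool.false_eq_true, if_false]
      exact List.filter_congr (fun x hx => by
        simp [(hpall x hx).ne'])
    rw [e1, e2, e3]
    simp
  | case2 c cs p ps n k d hne hlt ih =>
    intro hc hp
    obtain ⟨hcall, hc'⟩ := List.pairwise_cons.mp hc
    have hnotin : (p :: ps).contains c = false := by
      simp only [List.contains_cons, Bool.or_eq_false_iff]
      refine ⟨by simpa using (ne_of_lt hlt), ?_⟩
      simp only [List.contains_eq_mem, decide_eq_false_iff_not]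
      intro hmem
      exact absurd (lt_trans hlt ((List.pairwise_cons.mp hp).1 c hmem)) (lt_irrefl c)
    rw [ih hc' hp]
    have e1 : (c :: cs).filter (fun x => !(p :: ps).contains x)
        = c :: cs.filter (fun x => !(p :: ps).contains x) := by
      rw [List.filter_cons]
      simp only [hnotin, Bool.not_false, if_true]
    have e2 : (c :: cs).filter (fun x => (p :: ps).contains x)
        = cs.filter (fun x => (p :: ps).contains x) := by
      rw [List.filter_cons]
      simp only [hnotin, Bool.false_eq_true, if_false]
    have e3 : (p :: ps).filter (fun x => !cs.contains x)
        = (p :: ps).filter (fun x => !(c :: cs).contains x) := by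
      refine (List.filter_congr (fun x hx => ?_)).symm
      have hcx : c < x := by
        rcases List.mem_cons.mp hx with h | h
        · exact h ▸ hlt
        · exact lt_trans hlt ((List.pairwise_cons.mp hp).1 x h)
      simp [hcx.ne']
    rw [e1, e2, e3]
    simp
  | case3 c cs p ps n k d hne hnlt ih =>
    intro hc hp
    obtain ⟨hpall, hp'⟩ := List.pairwise_cons.mp hp
    have hpc : p < c := lt_of_le_of_ne (not_lt.mp hnlt) (fun h => hne (beq_iff_eq.mpr h.symm))
    have hnotin : (c :: cs).contains p = false := by
      simp only [List.contains_cons, Bool.or_eq_false_iff]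
      refine ⟨by simpa using (ne_of_lt hpc), ?_⟩
      simp only [List.contains_eq_mem, decide_eq_false_iff_not]
      intro hmem
      exact absurd (lt_trans hpc ((List.pairwise_cons.mp hc).1 p hmem)) (lt_irrefl p)
    rw [ih hc hp']
    have hall : ∀ x ∈ c :: cs, p < x := by
      intro x hx
      rcases List.mem_cons.mp hx with h | h
      · exact h ▸ hpc
      · exact lt_trans hpc ((List.pairwise_cons.mp hc).1 x h)
    have e1 : (c :: cs).filter (fun x => !ps.contains x)
        = (c :: cs).filter (fun x => !(p :: ps).contains x) := by
      refine (List.filter_congr (fun x hx => ?_)).symm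
      simp [(hall x hx).ne']
    have e2 : (c :: cs).filter (fun x => ps.contains x)
        = (c :: cs).filter (fun x => (p :: ps).contains x) := by
      refine (List.filter_congr (fun x hx => ?_)).symm
      simp [(hall x hx).ne']
    have e3 : (p :: ps).filter (fun x => !(c :: cs).contains x)
        = p :: ps.filter (fun x => !(c :: cs).contains x) := by
      rw [List.filter_cons]
      simp only [hnotin, Bool.not_false, if_true]
    rw [← e1, ← e2, e3]
    simp
  | case4 cs ps n k d h =>
    intro hc hp
    rcases cs with _ | ⟨c, cs⟩
    · simp
    · rcases ps with _ | ⟨p, ps⟩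
      · simp
      · exact (h c cs p ps rfl rfl).elim

theorem pvClassify_sorted (c p : List String) :
    pvClassify (PySem.List.sorted (PySem.Set.ofList c) (fun x => x) false)
               (PySem.List.sorted (PySem.Set.ofList p) (fun x => x) false) [] [] []
      = (PySem.List.sorted (PySem.Set.diff (PySem.Set.ofList c) (PySem.Set.ofList p)) (fun x => x) false,
         PySem.List.sorted (PySem.Set.inter (PySem.Set.ofList c) (PySem.Set.ofList p)) (fun x => x) false,
         PySem.List.sorted (PySem.Set.diff (PySem.Set.ofList p) (PySem.Set.ofList c)) (fun x => x) false) := by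
  have hc := PySem.List.sorted_ofList_pairwise_lt (xs := c)
  have hp := PySem.List.sorted_ofList_pairwise_lt (xs := p)
  have hcnd : (PySem.List.sorted (PySem.Set.ofList c) (fun x => x) false).Nodup :=
    (PySem.List.sorted_perm _ _ _).symm.nodup (PySem.Set.nodup_ofList _)
  have hpnd : (PySem.List.sorted (PySem.Set.ofList p) (fun x => x) false).Nodup :=
    (PySem.List.sorted_perm _ _ _).symm.nodup (PySem.Set.nodup_ofList _)
  rw [pvClassify_spec _ _ _ _ _ hc hp]
  simp only [List.nil_append]
  refine Prod.ext ?_ (Prod.ext ?_ ?_) <;> simp only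
  · refine (PySem.List.sorted_eq_of_perm_of_pairwise_lt _ _ (fun x => x) ?_ (hc.filter _)).symm
    refine (List.perm_ext_iff_of_nodup (hcnd.filter _) (PySem.Set.nodup_diff _ _ (PySem.Set.nodup_ofList _))).mpr ?_
    intro x
    simp [PySem.Set.mem_diff, PySem.Set.mem_ofList, PySem.List.mem_sorted, List.mem_filter]
  · refine (PySem.List.sorted_eq_of_perm_of_pairwise_lt _ _ (fun x => x) ?_ (hc.filter _)).symm
    refine (List.perm_ext_iff_of_nodup (hcnd.filter _) (PySem.Set.nodup_inter _ _ (PySem.Set.nodup_ofList _))).mpr ?_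
    intro x
    simp [PySem.Set.mem_inter, PySem.Set.mem_ofList, PySem.List.mem_sorted, List.mem_filter]
  · refine (PySem.List.sorted_eq_of_perm_of_pairwise_lt _ _ (fun x => x) ?_ (hp.filter _)).symm
    refine (List.perm_ext_iff_of_nodup (hpnd.filter _) (PySem.Set.nodup_diff _ _ (PySem.Set.nodup_ofList _))).mpr ?_
    intro x
    simp [PySem.Set.mem_diff, PySem.Set.mem_ofList, PySem.List.mem_sorted, List.mem_filter]

theorem pvFoldl_items (g : String → Bool) (f : String → List (String × List String))
    (keys : List String) (d : PySem.Dict String (List (String × List String)))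
    (hnd : keys.Nodup) (hdisj : ∀ k ∈ keys, d.contains k = false) :
    (keys.foldl (fun r k => if g k then r.insert k (f k) else r) d).items
      = d.items ++ keys.filterMap (fun k => if g k then some (k, f k) else none) := by
  induction keys generalizing d with
  | nil => simp
  | cons k ks ih =>
    obtain ⟨hk, hnd'⟩ := List.nodup_cons.mp hnd
    simp only [List.foldl_cons, List.filterMap_cons]
    by_cases hg : g k
    · rw [if_pos hg, if_pos hg]
      rw [ih (d.insert k (f k)) hnd' ?_]
      · rw [PySem.Dict.items_insert_of_not_contains _ _ (hdisj k (List.mem_cons_self))]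
        simp
      · intro k' hk'
        rw [PySem.Dict.contains_insert]
        have : k' ≠ k := fun h => hk (h ▸ hk')
        simp [this, hdisj k' (List.mem_cons_of_mem _ hk')]
    · rw [if_neg hg, if_neg hg]
      rw [ih d hnd' (fun k' hk' => hdisj k' (List.mem_cons_of_mem _ hk'))]


-- A's per-key guard and entry value, named so that A's foldl body can be cited by rfl
def pvF (current previous : List (String × List String)) (key : String) : List (String × List String) :=
  [("new", PySem.List.sorted (PySem.Set.diff (PySem.Set.ofList ((PySem.Dict.mk current).getD key [])) (PySem.Set.ofList ((PySem.Dict.mk previous).getD key []))) (fun x => x) false),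
   ("continuing", PySem.List.sorted (PySem.Set.inter (PySem.Set.ofList ((PySem.Dict.mk current).getD key [])) (PySem.Set.ofList ((PySem.Dict.mk previous).getD key []))) (fun x => x) false),
   ("disappeared", PySem.List.sorted (PySem.Set.diff (PySem.Set.ofList ((PySem.Dict.mk previous).getD key [])) (PySem.Set.ofList ((PySem.Dict.mk current).getD key []))) (fun x => x) false)]

def pvG (current previous : List (String × List String)) (key : String) : Bool :=
  !(PySem.List.sorted (PySem.Set.diff (PySem.Set.ofList ((PySem.Dict.mk current).getD key [])) (PySem.Set.ofList ((PySem.Dict.mk previous).getD key []))) (fun x => x) false).isEmpty ||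
  !(PySem.List.sorted (PySem.Set.inter (PySem.Set.ofList ((PySem.Dict.mk current).getD key [])) (PySem.Set.ofList ((PySem.Dict.mk previous).getD key []))) (fun x => x) false).isEmpty ||
  !(PySem.List.sorted (PySem.Set.diff (PySem.Set.ofList ((PySem.Dict.mk previous).getD key [])) (PySem.Set.ofList ((PySem.Dict.mk current).getD key []))) (fun x => x) false).isEmpty

-- ===== VERDICT (by name: the statement is the Claim_ definition above) =====
theorem diff_signals_spec : Claim_equal_diff_signals := by
  intro current previous _
  unfold Spec_diff_signals
  have hA : diff_signals current previous
      = ((PySem.Set.ofList ((PySem.Dict.mk current).keys ++ (PySem.Dict.mk previous).keys)).foldl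
          (fun r key => if pvG current previous key then r.insert key (pvF current previous key) else r)
          PySem.Dict.empty).items := rfl
  rw [hA, pvFoldl_items (pvG current previous) (pvF current previous) _ _
      (PySem.Set.nodup_ofList _) (fun k _ => by simp [PySem.Dict.contains_empty])]
  unfold diff_signals_alt
  simp only [PySem.List.dedup_eq_ofList]
  show _ = List.filterMap _ _
  rw [show (PySem.Dict.empty : PySem.Dict String (List (String × List String))).items = [] from rfl, List.nil_append]
  refine (List.filterMap_congr (fun key _ => ?_)).symm
  simp only [pvClassify_sorted]
  rfl
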